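-- pv_equiv track=rewrite | github.com/ps23456/Agentic-RAG-System | scripts/convert_md_to_txt_with_docling.py | _format_text_segment
-- ===== SOURCE A (Python) =====
-- def _format_text_segment(lines):
--     """
--     Format plain-text segment for LLM readability: align Label: value pairs,
--     emphasize # section headers, collapse excess blanks. Works on .md with no pipe tables.
--     """
--     if not lines:
--         return []
--     out = []
--     # Collapse consecutive blank lines to one, trim trailing blanks
--     cleaned = []
--     prev_blank = False
--     for line in lines:
--         is_blank = not line.strip()
--         if is_blank:
--             if not prev_blank:
--                 cleaned.append("")
--             prev_blank = True
--         else: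
--             cleaned.append(line)
--             prev_blank = False
--     lines = cleaned
--     i = 0
--     while i < len(lines):
--         line = lines[i]
--         stripped = line.strip()
--         # Section header: # HEADING -> prominent line + blank
--         if stripped.startswith("#"):
--             heading = stripped.lstrip("#").strip()
--             if heading:
--                 out.append(heading)
--                 out.append("")
--             i += 1
--             continue
--         # Collect a block of non-blank lines (until blank or next #)
--         block = []
--         while i < len(lines) and lines[i].strip() and not lines[i].strip().startswith("#"):
--             block.append(lines[i].strip())
--             i += 1
--         if not block:
--             if i < len(lines) and not lines[i].strip():
--                 out.append("")
--             i += 1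
--             continue
--         # Check if block is mostly "Label: value" lines (form fields)
--         label_value_lines = []
--         for ln in block:
--             if ": " in ln and not ln.strip().startswith("http"):
--                 idx = ln.find(": ")
--                 label_value_lines.append((ln[:idx].strip(), ln[idx + 2:].strip()))
--             else:
--                 label_value_lines.append(None)  # not a label-value line
--         if all(x is not None for x in label_value_lines) and len(label_value_lines) >= 1:
--             w = max(len(l) for l, v in label_value_lines)
--             for (label, value) in label_value_lines:
--                 out.append((label + ":").ljust(w + 2) + " " + value)
--         elif any(x is not None for x in label_value_lines):
--             # Mixed block: align only the label-value lines, leave others as-is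
--             w = 0
--             for item in label_value_lines:
--                 if item is not None:
--                     w = max(w, len(item[0]))
--             for j, ln in enumerate(block):
--                 if label_value_lines[j] is not None:
--                     label, value = label_value_lines[j]
--                     out.append((label + ":").ljust(w + 2) + " " + value)
--                 else:
--                     out.append(ln)
--         else:
--             for ln in block:
--                 out.append(ln)
--         out.append("")
--         if i < len(lines) and not lines[i].strip():
--             i += 1
--     return out
-- ===== SOURCE B (Python) =====
-- def _parse(ln):
--     # Label-value detection: ": " present and the line does not start with "http".
--     if ": " in ln and not ln.strip().startswith("http"):
--         i = ln.find(": ")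
--         return (ln[:i].strip(), ln[i + 2:].strip())
--     return None
--
--
-- def _collect(lines):
--     # Split off the maximal leading run of non-blank, non-header lines (stripped).
--     block = []
--     for k, ln in enumerate(lines):
--         s = ln.strip()
--         if not s or s.startswith("#"):
--             return block, lines[k:]
--         block.append(s)
--     return block, []
--
--
-- def _segments(lines):
--     # One pass: each line consumed exactly once, into header/blank/block segments.
--     segs = []
--     while lines:
--         s = lines[0].strip()
--         if s.startswith("#"):
--             segs.append(("header", s.lstrip("#").strip()))
--             lines = lines[1:]
--         elif not s:
--             segs.append(("blank", None))
--             lines = lines[1:]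
--         else:
--             block, rest = _collect(lines)
--             segs.append(("block", block))
--             # a blank right after a block is swallowed (the block renders its own "")
--             if rest and not rest[0].strip():
--                 rest = rest[1:]
--             lines = rest
--     return segs
--
--
-- def _render(seg):
--     kind, data = seg
--     if kind == "header":
--         return [data, ""] if data else []
--     if kind == "blank":
--         return [""]
--     pairs = [(ln, _parse(ln)) for ln in data]
--     w = 0
--     for _, p in pairs:
--         if p is not None:
--             w = max(w, len(p[0]))
--     out = []
--     for ln, p in pairs:
--         if p is None:
--             out.append(ln)
--         else:
--             label, value = p
--             out.append((label + ":").ljust(w + 2) + " " + value)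
--     out.append("")
--     return out
--
--
-- def _format_text_segment(lines):
--     if not lines:
--         return []
--     prevs = ["x"] + lines[:-1]
--     cleaned = [ln if ln.strip() else "" for ln, pv in zip(lines, prevs)
--                if ln.strip() or pv.strip()]
--     return [s for seg in _segments(cleaned) for s in _render(seg)]
-- ===== Notes on version B (the rewrite author's own statement) =====
-- stated objective: alternative
-- what changed: A's monolithic index-walking while-loop with inline blank-collapsing state and three redundant label-alignment branches is replaced by a pipeline: a lookback comprehension collapses blanks, a single pass splits the lines into header/blank/block segments, and a separate render pass maps each segment to output with one unified label-alignment path (A's all/any branches agree).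
import Mathlib
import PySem

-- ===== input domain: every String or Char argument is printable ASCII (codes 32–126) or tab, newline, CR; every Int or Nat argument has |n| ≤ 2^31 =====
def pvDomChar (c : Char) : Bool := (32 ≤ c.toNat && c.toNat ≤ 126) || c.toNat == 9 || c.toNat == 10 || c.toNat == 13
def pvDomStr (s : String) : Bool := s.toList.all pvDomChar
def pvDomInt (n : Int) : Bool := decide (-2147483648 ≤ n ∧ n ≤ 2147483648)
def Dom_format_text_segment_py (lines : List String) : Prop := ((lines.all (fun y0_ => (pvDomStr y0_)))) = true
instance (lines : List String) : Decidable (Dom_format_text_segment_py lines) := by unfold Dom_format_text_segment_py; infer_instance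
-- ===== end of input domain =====

-- B replaces A's monolithic index-walking loop by a collapse/segment/render pipeline with one
-- unified label-alignment path (A's all/any branches agree); return value only, no mutation.

-- ===== PORT A =====

-- hand port of Python s.lstrip("#") (PySem has no lstrip-with-chars): drop leading '#'; exact
def pvLstripHash (s : String) : String := String.mk (s.toList.dropWhile (· == '#'))

-- hand port of Python s.ljust(w): pad with spaces on the right to width w (no-op if already ≥ w); exact
def pvLjust (s : String) (w : Int) : String :=
  s ++ String.mk (List.replicate (w - PySem.Str.len s).toNat ' ')

-- A's inner while: collect the maximal run of non-blank non-header lines (stripped), return (block, rest)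
def pvACollect : List String → List String × List String
  | [] => ([], [])
  | x :: t =>
    if PySem.Str.strip x ≠ "" ∧ ¬ PySem.Str.startswith (PySem.Str.strip x) "#" then
      let r := pvACollect t
      (PySem.Str.strip x :: r.1, r.2)
    else ([], x :: t)

-- termination helper for the outer while-loops (cited in decreasing_by)
theorem pvACollect_length : ∀ l : List String, (pvACollect l).1.length + (pvACollect l).2.length = l.length := by
  intro l
  induction l with
  | nil => simp [pvACollect]
  | cons x t ih =>
    simp only [pvACollect]
    split
    · simpa using by omega
    · simp

-- A's outer while-loop, `out` is the accumulator, the list argument is lines[i:]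
def pvALoop (ls : List String) (out : List String) : List String :=
  match ls with
  | [] => out
  | line :: rest =>
    let stripped := PySem.Str.strip line
    if PySem.Str.startswith stripped "#" then
      let heading := PySem.Str.strip (pvLstripHash stripped)
      pvALoop rest (if heading ≠ "" then out ++ [heading, ""] else out)
    else
      let br := pvACollect (line :: rest)
      if hb : br.1 = [] then
        -- here i < len(lines) holds (line exists) and lines[i] is blank (block empty, not a header)
        pvALoop rest (if PySem.Str.strip line = "" then out ++ [""] else out)
      else
        let block := br.1
        let lvl := block.map (fun ln =>
          if PySem.Str.isIn ": " ln && !PySem.Str.startswith (PySem.Str.strip ln) "http" then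
            let idx := PySem.Str.find ln ": "
            some (PySem.Str.strip (PySem.Str.slice ln none (some idx)),
                  PySem.Str.strip (PySem.Str.slice ln (some (idx + 2)) none))
          else none)
        let out2 :=
          if lvl.all (·.isSome) && decide (1 ≤ lvl.length) then
            -- Python max over a nonempty generator; getD 0 is unreachable (lvl ≠ [])
            let w := (PySem.List.max? (lvl.map fun o => PySem.Str.len (o.getD ("", "")).1) (fun x => x)).getD 0
            out ++ lvl.map (fun o => let lv := o.getD ("", "")
              pvLjust (lv.1 ++ ":") (w + 2) ++ " " ++ lv.2)
          else if lvl.any (·.isSome) then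
            let w := lvl.foldl (fun w o => match o with | some lv => max w (PySem.Str.len lv.1) | none => w) 0
            out ++ (PySem.List.enumerate block).map (fun jl =>
              match (PySem.List.pyGet? lvl jl.1).getD none with
              | some lv => pvLjust (lv.1 ++ ":") (w + 2) ++ " " ++ lv.2
              | none => jl.2)
          else out ++ block
        let out3 := out2 ++ [""]
        -- Python: if i < len(lines) and not lines[i].strip(): i += 1
        -- (headI "" encodes the bounds check: for empty br.2 the strip test holds and tail [] = [])
        pvALoop (if PySem.Str.strip br.2.headI = "" then br.2.tail else br.2) out3
  termination_by ls.length
  decreasing_by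
  all_goals first
  | (simp; done)
  | (simp; omega)
  | (have h := pvACollect_length (line :: rest)
     have h1 : 1 ≤ (pvACollect (line :: rest)).1.length := by
       cases hc : (pvACollect (line :: rest)).1 with
       | nil => exact absurd hc hb
       | cons a b => simp
     simp only [List.length_cons] at h ⊢
     split
     · simp only [List.length_tail]; omega
     · omega)

def format_text_segment_py (lines : List String) : List String :=
  if lines = [] then []
  else
    let cleaned := (lines.foldl (fun st line =>
        if PySem.Str.strip line = "" then
          (if st.2 then st.1 else st.1 ++ [""], true)
        else (st.1 ++ [line], false)) (([] : List String), false)).1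
    pvALoop cleaned []

-- ===== PORT B =====

-- B's _parse helper
def pvParse (ln : String) : Option (String × String) :=
  if PySem.Str.isIn ": " ln && !PySem.Str.startswith (PySem.Str.strip ln) "http" then
    let i := PySem.Str.find ln ": "
    some (PySem.Str.strip (PySem.Str.slice ln none (some i)),
          PySem.Str.strip (PySem.Str.slice ln (some (i + 2)) none))
  else none

-- B's _collect helper
def pvBCollect : List String → List String × List String
  | [] => ([], [])
  | x :: t =>
    if PySem.Str.strip x ≠ "" ∧ ¬ PySem.Str.startswith (PySem.Str.strip x) "#" then
      let r := pvBCollect t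
      (PySem.Str.strip x :: r.1, r.2)
    else ([], x :: t)

theorem pvBCollect_length : ∀ l : List String, (pvBCollect l).1.length + (pvBCollect l).2.length = l.length := by
  intro l
  induction l with
  | nil => simp [pvBCollect]
  | cons x t ih =>
    simp only [pvBCollect]
    split
    · simpa using by omega
    · simp

inductive PvSeg where
  | header (h : String)
  | blank
  | block (b : List String)
deriving DecidableEq, Repr

-- B's _segments: one pass splitting the cleaned lines into segments
def pvSegments (ls : List String) : List PvSeg :=
  match ls with
  | [] => []
  | line :: rest =>
    let s := PySem.Str.strip line
    if hH : PySem.Str.startswith s "#" then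
      PvSeg.header (PySem.Str.strip (pvLstripHash s)) :: pvSegments rest
    else if hB : s = "" then
      PvSeg.blank :: pvSegments rest
    else
      let br := pvBCollect (line :: rest)
      -- a blank right after a block is swallowed (headI "" makes the test hold for empty br.2, tail [] = [])
      PvSeg.block br.1 ::
        pvSegments (if PySem.Str.strip br.2.headI = "" then br.2.tail else br.2)
  termination_by ls.length
  decreasing_by
  all_goals first
  | (simp; done)
  | (simp; omega)
  | (have h2 : (pvBCollect (line :: rest)).2 = (pvBCollect rest).2 := by
       simp only [pvBCollect]; rw [if_pos]; exact ⟨hB, hH⟩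
     have h3 := pvBCollect_length rest
     rw [h2]
     simp only [List.length_cons] at h3 ⊢
     split
     · simp only [List.length_tail]; omega
     · omega)

-- B's _render
def pvRender : PvSeg → List String
  | PvSeg.header h => if h ≠ "" then [h, ""] else []
  | PvSeg.blank => [""]
  | PvSeg.block b =>
    let pairs := b.map (fun ln => (ln, pvParse ln))
    let w := pairs.foldl (fun w p => match p.2 with | some lv => max w (PySem.Str.len lv.1) | none => w) 0
    (pairs.map (fun p => match p.2 with
      | some lv => pvLjust (lv.1 ++ ":") (w + 2) ++ " " ++ lv.2
      | none => p.1)) ++ [""]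

def format_text_segment_py_alt (lines : List String) : List String :=
  if lines = [] then []
  else
    let prevs := "x" :: PySem.List.slice lines none (some (-1))
    let cleaned := (lines.zip prevs).filterMap (fun lp =>
        if PySem.Str.strip lp.1 ≠ "" ∨ PySem.Str.strip lp.2 ≠ "" then
          some (if PySem.Str.strip lp.1 = "" then "" else lp.1)
        else none)
    (pvSegments cleaned).flatMap pvRender

-- ===== PRECONDITION & SPEC =====
def Spec_format_text_segment_py (lines : List String) (out : List String) : Prop := out = format_text_segment_py_alt lines
instance (lines : List String) (out : List String) : Decidable (Spec_format_text_segment_py lines out) := by unfold Spec_format_text_segment_py; infer_instance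

-- ===== CLAIM (what is proved, stated in full; the proofs are below) =====
def Claim_equal_format_text_segment_py : Prop := ∀ (lines : List String), Dom_format_text_segment_py lines → Spec_format_text_segment_py lines (format_text_segment_py lines)

-- ===== LEMMAS AND PROOFS =====

theorem pvCollect_eq : ∀ l, pvACollect l = pvBCollect l := by
  intro l
  induction l with
  | nil => rfl
  | cons x t ih => simp only [pvACollect, pvBCollect, ih]

theorem pvCollapse_eq : ∀ (t acc : List String) (p : String),
    (t.foldl (fun st line =>
        if PySem.Str.strip line = "" then
          (if st.2 then st.1 else st.1 ++ [""], true)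
        else (st.1 ++ [line], false)) (acc, decide (PySem.Str.strip p = ""))).1
    = acc ++ (t.zip (p :: t.dropLast)).filterMap (fun lp =>
        if PySem.Str.strip lp.1 ≠ "" ∨ PySem.Str.strip lp.2 ≠ "" then
          some (if PySem.Str.strip lp.1 = "" then "" else lp.1)
        else none) := by
  intro t
  induction t with
  | nil => intro acc p; simp
  | cons l t ih =>
    intro acc p
    have hzip : ((l :: t).zip (p :: (l :: t).dropLast)) = (l, p) :: t.zip (l :: t.dropLast) := by
      cases t with
      | nil => simp
      | cons a b => simp [List.zip]
    rw [hzip, List.filterMap_cons, List.foldl_cons]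
    by_cases hl : PySem.Str.strip l = ""
    · rw [if_pos hl]
      by_cases hp : PySem.Str.strip p = ""
      · rw [if_pos (by simp [hp])]
        rw [show (if PySem.Str.strip l ≠ "" ∨ PySem.Str.strip p ≠ "" then
            some (if PySem.Str.strip l = "" then "" else l) else none) = none by simp [hl, hp]]
        have h2 := ih acc l
        rw [show decide (PySem.Str.strip l = "") = true by simp [hl]] at h2
        exact h2
      · rw [if_neg (by simp [hp])]
        rw [show (if PySem.Str.strip l ≠ "" ∨ PySem.Str.strip p ≠ "" then
            some (if PySem.Str.strip l = "" then "" else l) else none) = some "" by simp [hl, hp]]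
        have h2 := ih (acc ++ [""]) l
        rw [show decide (PySem.Str.strip l = "") = true by simp [hl]] at h2
        rw [h2]; simp
    · rw [if_neg hl]
      rw [show (if PySem.Str.strip l ≠ "" ∨ PySem.Str.strip p ≠ "" then
          some (if PySem.Str.strip l = "" then "" else l) else none) = some l by simp [hl]]
      have h2 := ih (acc ++ [l]) l
      rw [show decide (PySem.Str.strip l = "") = false by simp [hl]] at h2
      rw [h2]; simp

theorem pvLfold1 : ∀ (lvl : List (Option (String × String))) (a : Int), (∀ o ∈ lvl, o.isSome) →
    lvl.foldl (fun w o => match o with | some lv => max w (PySem.Str.len lv.1) | none => w) a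
    = (lvl.map (fun o => PySem.Str.len (o.getD ("", "")).1)).foldl max a := by
  intro lvl
  induction lvl with
  | nil => simp
  | cons o t ih =>
    intro a h
    obtain ⟨lv, rfl⟩ := Option.isSome_iff_exists.mp (h o (by simp))
    simp only [List.foldl_cons, List.map_cons, Option.getD_some]
    exact ih _ (fun o ho => h o (by simp [ho]))

theorem pvLmax : ∀ (ns : List Int), (∀ x ∈ ns, 0 ≤ x) → ns ≠ [] →
    (PySem.List.max? ns (fun x => x)).getD 0 = ns.foldl max 0 := by
  intro ns h hne
  cases ns with
  | nil => exact absurd rfl hne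
  | cons x t =>
    rw [PySem.List.max?_id_cons]
    simp only [Option.getD_some, List.foldl_cons]
    rw [max_eq_right (h x (by simp))]

theorem pvLmap_all : ∀ (F : String × String → String) (b : List String),
    (∀ ln ∈ b, (pvParse ln).isSome) →
    b.map (fun ln => match pvParse ln with | some lv => F lv | none => ln)
    = (b.map pvParse).map (fun o => F (o.getD ("", ""))) := by
  intro F b
  induction b with
  | nil => simp
  | cons x t ih =>
    intro h
    obtain ⟨lv, hlv⟩ := Option.isSome_iff_exists.mp (h x (by simp))
    simp only [List.map_cons, hlv, Option.getD_some]
    rw [ih (fun ln hln => h ln (by simp [hln]))]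

theorem pvLmap_none : ∀ (F : String × String → String) (b : List String),
    (∀ ln ∈ b, pvParse ln = none) →
    b.map (fun ln => match pvParse ln with | some lv => F lv | none => ln) = b := by
  intro F b
  induction b with
  | nil => simp
  | cons x t ih =>
    intro h
    simp only [List.map_cons, h x (by simp)]
    rw [ih (fun ln hln => h ln (by simp [hln]))]

theorem pvLenum : ∀ (F : String × String → String) (b : List String)
    (pre : List (Option (String × String))),
    (PySem.List.enumerate b (pre.length : Int)).map (fun jl =>
       match (PySem.List.pyGet? (pre ++ b.map pvParse) jl.1).getD none with
       | some lv => F lv | none => jl.2)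
    = b.map (fun ln => match pvParse ln with | some lv => F lv | none => ln) := by
  intro F b
  induction b with
  | nil => simp
  | cons x t ih =>
    intro pre
    rw [PySem.List.enumerate_cons]
    simp only [List.map_cons]
    have hget : PySem.List.pyGet? (pre ++ pvParse x :: t.map pvParse) ((pre.length : Int)) = some (pvParse x) := by
      rw [PySem.List.pyGet?_natCast]
      rw [List.getElem?_append_right (le_refl pre.length)]
      simp
    congr 1
    · rw [hget]
      cases pvParse x <;> simp
    · have h2 := ih (pre ++ [pvParse x])
      rw [List.length_append] at h2
      push_cast at h2
      rw [List.append_assoc] at h2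
      simp only [List.singleton_append] at h2
      exact h2

theorem pvBlock_eq : ∀ (block : List String), block ≠ [] →
    ((if (block.map pvParse).all (·.isSome) && decide (1 ≤ (block.map pvParse).length) then
        (block.map pvParse).map (fun o =>
          pvLjust ((o.getD ("", "")).1 ++ ":")
              ((PySem.List.max? ((block.map pvParse).map fun o => PySem.Str.len (o.getD ("", "")).1) (fun x => x)).getD 0 + 2)
            ++ " " ++ (o.getD ("", "")).2)
      else if (block.map pvParse).any (·.isSome) then
        (PySem.List.enumerate block).map (fun jl =>
          match (PySem.List.pyGet? (block.map pvParse) jl.1).getD none with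
          | some lv => pvLjust (lv.1 ++ ":")
              ((block.map pvParse).foldl (fun w o => match o with | some lv => max w (PySem.Str.len lv.1) | none => w) 0 + 2)
              ++ " " ++ lv.2
          | none => jl.2)
      else block) ++ [""])
    = pvRender (PvSeg.block block) := by
  intro block hb
  simp only [pvRender]
  have hm : ∀ (F : String × String → String),
      (block.map (fun ln => (ln, pvParse ln))).map (fun p => match p.2 with
        | some lv => F lv | none => p.1)
      = block.map (fun ln => match pvParse ln with | some lv => F lv | none => ln) := by
    intro F; rw [List.map_map]; rfl
  have hw : (block.map (fun ln => (ln, pvParse ln))).foldl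
        (fun w p => match p.2 with | some lv => max w (PySem.Str.len lv.1) | none => w) 0
      = (block.map pvParse).foldl
        (fun w o => match o with | some lv => max w (PySem.Str.len lv.1) | none => w) 0 := by
    rw [List.foldl_map, List.foldl_map]
  rw [hm, hw]
  by_cases hall : ((block.map pvParse).all (·.isSome) && decide (1 ≤ (block.map pvParse).length)) = true
  · rw [if_pos hall]
    have hsome : ∀ o ∈ block.map pvParse, o.isSome := by
      intro o ho
      exact List.all_eq_true.mp (Bool.and_elim_left hall) o ho
    have hsome' : ∀ ln ∈ block, (pvParse ln).isSome := by
      intro ln hln; exact hsome _ (List.mem_map_of_mem hln)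
    have hwAB : ((PySem.List.max? ((block.map pvParse).map fun o => PySem.Str.len (o.getD ("", "")).1) (fun x => x)).getD 0)
        = (block.map pvParse).foldl (fun w o => match o with | some lv => max w (PySem.Str.len lv.1) | none => w) 0 := by
      rw [pvLfold1 _ _ hsome]
      refine pvLmax _ ?_ ?_
      · intro x hx
        simp only [List.mem_map] at hx
        obtain ⟨o, _, rfl⟩ := hx
        simp [PySem.Str.len_eq]
      · simp [hb]
    rw [pvLmap_all _ block hsome']
    simp only [hwAB]
  · rw [if_neg hall]
    by_cases hany : ((block.map pvParse).any (·.isSome)) = true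
    · rw [if_pos hany]
      have he := pvLenum (fun lv => pvLjust (lv.1 ++ ":") ((block.map pvParse).foldl
          (fun w o => match o with | some lv => max w (PySem.Str.len lv.1) | none => w) 0 + 2) ++ " " ++ lv.2) block []
      simp only [List.nil_append, List.length_nil, Nat.cast_zero] at he
      exact congrArg (· ++ [""]) he
    · rw [if_neg hany]
      have hnone : ∀ ln ∈ block, pvParse ln = none := by
        intro ln hln
        have := List.any_eq_false.mp (Bool.of_not_eq_true hany) _ (List.mem_map_of_mem hln)
        simpa using this
      rw [pvLmap_none _ block hnone]

theorem pvIfFactor (c1 c2 : Prop) [Decidable c1] [Decidable c2]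
    (out X1 X2 X3 T : List String) :
    ((if c1 then out ++ X1 else if c2 then out ++ X2 else out ++ X3) ++ [""]) ++ T
    = out ++ (((if c1 then X1 else if c2 then X2 else X3) ++ [""]) ++ T) := by
  split_ifs <;> simp

theorem pvMainLoop_eq : ∀ (ls out : List String),
    pvALoop ls out = out ++ (pvSegments ls).flatMap pvRender := by
  have H : ∀ (n : Nat) (ls out : List String), ls.length ≤ n →
      pvALoop ls out = out ++ (pvSegments ls).flatMap pvRender := by
    intro n
    induction n with
    | zero =>
      intro ls out h
      have hnil : ls = [] := List.eq_nil_of_length_eq_zero (Nat.le_zero.mp h)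
      subst hnil
      simp [pvALoop, pvSegments]
    | succ n ih =>
      intro ls out h
      match ls with
      | [] => simp [pvALoop, pvSegments]
      | line :: rest =>
        have hrest : rest.length ≤ n := by simpa using h
        rw [pvALoop.eq_def, pvSegments.eq_def]
        simp only
        by_cases hH : PySem.Str.startswith (PySem.Str.strip line) "#" = true
        · rw [if_pos hH, dif_pos hH]
          rw [ih rest _ hrest]
          simp only [List.flatMap_cons, pvRender]
          by_cases hh : PySem.Str.strip (pvLstripHash (PySem.Str.strip line)) = ""
          · simp [hh]
          · simp [hh]
        · rw [if_neg hH, dif_neg hH]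
          by_cases hbl : PySem.Str.strip line = ""
          · have hA : pvACollect (line :: rest) = ([], line :: rest) := by
              simp only [pvACollect]
              rw [if_neg (by simp [hbl])]
            rw [dif_pos hbl]
            simp only [hA]
            rw [dif_pos trivial, if_pos hbl]
            rw [ih rest _ hrest]
            simp [pvRender]
          · have hA : pvACollect (line :: rest)
                = (PySem.Str.strip line :: (pvACollect rest).1, (pvACollect rest).2) := by
              simp only [pvACollect]
              rw [if_pos ⟨hbl, hH⟩]
            rw [dif_neg hbl]
            rw [← pvCollect_eq]
            simp only [hA]
            rw [dif_neg (by simp)]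
            rw [show (fun ln =>
                if (PySem.Str.isIn ": " ln && !PySem.Str.startswith (PySem.Str.strip ln) "http") = true then
                  some (PySem.Str.strip (PySem.Str.slice ln none (some (PySem.Str.find ln ": "))),
                        PySem.Str.strip (PySem.Str.slice ln (some (PySem.Str.find ln ": " + 2)) none))
                else none) = pvParse from rfl]
            have hbne : PySem.Str.strip line :: (pvACollect rest).1 ≠ [] := by simp
            rw [List.flatMap_cons, ← pvBlock_eq _ hbne]
            have htl : (pvACollect rest).2.length ≤ rest.length := by
              have := pvACollect_length rest; omega
            have hlen : (if PySem.Str.strip (pvACollect rest).2.headI = ""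
                then (pvACollect rest).2.tail else (pvACollect rest).2).length ≤ n := by
              have : (if PySem.Str.strip (pvACollect rest).2.headI = ""
                  then (pvACollect rest).2.tail else (pvACollect rest).2).length
                  ≤ (pvACollect rest).2.length := by
                split
                · simp only [List.length_tail]; omega
                · exact le_refl _
              omega
            rw [ih _ _ hlen]
            exact pvIfFactor _ _ _ _ _ _ _
  intro ls out
  exact H ls.length ls out (le_refl _)

theorem format_text_segment_py_spec : Claim_equal_format_text_segment_py := by
  intro lines _
  unfold Spec_format_text_segment_py
  unfold format_text_segment_py format_text_segment_py_alt
  by_cases h : lines = []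
  · simp [h]
  · simp only [if_neg h]
    rw [pvMainLoop_eq]
    have hc := pvCollapse_eq lines [] "x"
    have hx : decide (PySem.Str.strip "x" = "") = false := by decide
    rw [hx] at hc
    simp only [PySem.List.slice_to_neg_one]
    rw [hc]
    simp
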